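-- pv_equiv track=rewrite | github.com/kanedu828/Cordia | cordia/util/text_format_util.py | get_stars_string
-- ===== SOURCE A (Python) =====
-- def get_stars_string(stars, max_stars):
--     # Create the filled stars
--     filled_stars = ["<:cordia_star:1281789019826557029>" for _ in range(stars)]
--     # Create the empty stars
--     empty_stars = [
--         "<:cordia_empty_star:1281789033386741824>" for _ in range(max_stars - stars)
--     ]
--
--     # Combine both parts
--     star_output = filled_stars + empty_stars
--
--     # Split into chunks of 5 emojis for readability
--     star_chunks = [
--         "".join(star_output[i : i + 5]) for i in range(0, len(star_output), 5)
--     ]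
--
--     # Join the chunks with a space
--     return " ".join(star_chunks)
-- ===== SOURCE B (Python) =====
-- def get_stars_string(stars, max_stars):
--     FILLED = "<:cordia_star:1281789019826557029>"
--     EMPTY = "<:cordia_empty_star:1281789033386741824>"
--     n_filled = max(stars, 0)
--     total = n_filled + max(max_stars - stars, 0)
--     out = ""
--     for i in range(total):
--         if i != 0 and i % 5 == 0:
--             out += " "
--         out += FILLED if i < n_filled else EMPTY
--     return out
-- ===== Notes on version B (the rewrite author's own statement) =====
-- stated objective: simpler
-- what changed: A builds two emoji lists, concatenates them, slices the result into chunks of 5 and joins twice; B is a single position-tracking loop that appends each emoji directly to one accumulator string, inserting the group separator before every fifth position.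
import Mathlib
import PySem

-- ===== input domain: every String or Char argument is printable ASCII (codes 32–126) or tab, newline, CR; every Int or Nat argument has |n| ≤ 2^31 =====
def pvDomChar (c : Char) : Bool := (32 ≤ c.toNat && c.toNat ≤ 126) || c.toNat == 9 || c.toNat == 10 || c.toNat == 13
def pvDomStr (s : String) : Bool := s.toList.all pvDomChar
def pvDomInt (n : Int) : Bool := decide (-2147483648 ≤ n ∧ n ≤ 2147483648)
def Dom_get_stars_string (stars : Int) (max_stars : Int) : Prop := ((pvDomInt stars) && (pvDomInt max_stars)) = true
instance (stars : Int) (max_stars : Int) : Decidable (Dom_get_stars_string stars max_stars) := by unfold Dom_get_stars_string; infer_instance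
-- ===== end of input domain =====

-- B replaces A's build-two-lists / concatenate / slice-into-chunks-of-5 / double-join pipeline by a
-- single position-tracking fold that appends each emoji (and a group separator before every fifth
-- position) directly to one output string; objective: simpler (same cost).

-- shared emoji constants (the same literals both Pythons use)
def pvFilled : String := "<:cordia_star:1281789019826557029>"
def pvEmpty : String := "<:cordia_empty_star:1281789033386741824>"

-- ===== PORT A =====
def get_stars_string (stars : Int) (max_stars : Int) : String :=
  let filled_stars := (PySem.List.pyRange 0 stars 1).map (fun _ => pvFilled)
  let empty_stars := (PySem.List.pyRange 0 (max_stars - stars) 1).map (fun _ => pvEmpty)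
  let star_output := filled_stars ++ empty_stars
  let star_chunks := (PySem.List.pyRange 0 (star_output.length : Int) 5).map
      (fun i => PySem.Str.join "" (PySem.List.slice star_output (some i) (some (i + 5))))
  PySem.Str.join " " star_chunks

-- ===== PORT B =====
def get_stars_string_alt (stars : Int) (max_stars : Int) : String :=
  let n_filled := max stars 0
  let total := n_filled + max (max_stars - stars) 0
  (PySem.List.pyRange 0 total 1).foldl
    (fun out i =>
      (if i ≠ 0 ∧ PySem.Int.mod i 5 = 0 then out ++ " " else out) ++
      (if i < n_filled then pvFilled else pvEmpty)) ""

-- ===== PRECONDITION & SPEC =====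
def Spec_get_stars_string (stars : Int) (max_stars : Int) (out : String) : Prop := out = get_stars_string_alt stars max_stars
instance (stars : Int) (max_stars : Int) (out : String) : Decidable (Spec_get_stars_string stars max_stars out) := by unfold Spec_get_stars_string; infer_instance

-- ===== CLAIM (what is proved, stated in full; the proofs are below) =====
def Claim_equal_get_stars_string : Prop := ∀ (stars : Int) (max_stars : Int), Dom_get_stars_string stars max_stars → Spec_get_stars_string stars max_stars (get_stars_string stars max_stars)

-- ===== LEMMAS AND PROOFS =====

-- chunks of 5 (the shape A's slice loop produces)
def pvChunks5 : List String → List (List String)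
  | [] => []
  | s :: r => (s :: r).take 5 :: pvChunks5 (r.drop 4)
termination_by L => L.length
decreasing_by simp

lemma pvChunks5_eq (M : List String) (h : M ≠ []) :
    pvChunks5 M = M.take 5 :: pvChunks5 (M.drop 5) := by
  cases M with
  | nil => exact absurd rfl h
  | cons s r => rw [pvChunks5]; simp

lemma pyRange5_nil (a b : Int) (h : b ≤ a) : PySem.List.pyRange a b 5 = [] := by
  rw [PySem.List.pyRange_of_pos a b (by norm_num)]
  simp [show ¬ a < b by omega]

lemma pyRange5_cons (a b : Int) (h : a < b) :
    PySem.List.pyRange a b 5 = a :: PySem.List.pyRange (a + 5) b 5 := by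
  rw [PySem.List.pyRange_of_pos a b (by norm_num), PySem.List.pyRange_of_pos (a+5) b (by norm_num)]
  rw [if_pos h]
  by_cases h2 : a + 5 < b
  · rw [if_pos h2]
    have hc : ((b - a + 5 - 1) / 5).toNat = ((b - (a+5) + 5 - 1) / 5).toNat + 1 := by omega
    rw [hc, List.range_succ_eq_map]
    simp [List.map_map, Function.comp]
    intro k _; ring
  · rw [if_neg h2]
    have hc : ((b - a + 5 - 1) / 5).toNat = 1 := by omega
    rw [hc]
    simp

-- A's slice loop computes exactly the chunks-of-5 of the list
lemma pvMapSlice (L : List String) (m : Nat) : ∀ (a : Nat), L.length ≤ a + m →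
    (PySem.List.pyRange (a : Int) (L.length : Int) 5).map
      (fun i => PySem.List.slice L (some i) (some (i + 5))) = pvChunks5 (L.drop a) := by
  induction m with
  | zero =>
    intro a hm
    rw [pyRange5_nil _ _ (by exact_mod_cast hm)]
    rw [List.drop_eq_nil_of_le (by omega)]
    simp [pvChunks5]
  | succ m ih =>
    intro a hm
    by_cases hla : L.length ≤ a
    · rw [pyRange5_nil _ _ (by exact_mod_cast hla)]
      rw [List.drop_eq_nil_of_le hla]
      simp [pvChunks5]
    · push Not at hla
      rw [pyRange5_cons _ _ (by exact_mod_cast hla)]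
      rw [List.map_cons]
      rw [pvChunks5_eq _ (by simp [List.drop_eq_nil_iff]; omega)]
      congr 1
      · show PySem.List.slice L (some (a:Int)) (some ((a:Int) + 5)) = _
        have : ((a:Int) + 5) = ((a + 5 : Nat) : Int) := by push_cast; ring
        rw [this, PySem.List.slice_natCast]
        congr 1
        omega
      · have : ((a:Int) + 5) = ((a + 5 : Nat) : Int) := by push_cast; ring
        rw [this, ih (a+5) (by omega)]
        rw [List.drop_drop]

-- the character stream B's loop emits, position by position
def pvBcat (nf : Int) : Nat → Nat → List Char
  | _, 0 => []
  | i, m + 1 =>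
      (if i ≠ 0 ∧ i % 5 = 0 then [' '] else []) ++
      (if (i : Int) < nf then pvFilled.toList else pvEmpty.toList) ++ pvBcat nf (i + 1) m

-- the same stream read off a list of strings with a position counter
def pvSepcat : List String → Nat → List Char
  | [], _ => []
  | s :: r, i => (if i ≠ 0 ∧ i % 5 = 0 then [' '] else []) ++ s.toList ++ pvSepcat r (i + 1)

lemma pvFoldB (nf : Int) (m : Nat) : ∀ (i : Nat) (acc : String),
    ((PySem.List.pyRange (i : Int) ((i + m : Nat) : Int) 1).foldl
      (fun out j =>
        (if j ≠ 0 ∧ PySem.Int.mod j 5 = 0 then out ++ " " else out) ++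
        (if j < nf then pvFilled else pvEmpty)) acc).toList
      = acc.toList ++ pvBcat nf i m := by
  induction m with
  | zero => intro i acc; rw [PySem.List.pyRange_one_eq_nil (by omega)]; simp [pvBcat]
  | succ m ih =>
    intro i acc
    rw [PySem.List.pyRange_one_cons (by push_cast; omega)]
    rw [List.foldl_cons]
    have hcast : ((i : Int) + 1) = ((i + 1 : Nat) : Int) := by push_cast; ring
    have hcast2 : ((i + (m+1) : Nat) : Int) = (((i+1) + m : Nat) : Int) := by push_cast; ring
    rw [hcast, hcast2, ih]
    rw [pvBcat]
    have hmod : PySem.Int.mod ((i:Int)) 5 = ((i % 5 : Nat) : Int) := by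
      rw [PySem.Int.mod_eq_emod_of_pos (by norm_num)]
      push_cast
      omega
    have hne : (((i:Int)) ≠ 0) ↔ (i ≠ 0) := by omega
    by_cases h1 : i ≠ 0 ∧ i % 5 = 0
    · rw [if_pos (show ((i:Int) ≠ 0) ∧ PySem.Int.mod (i:Int) 5 = 0 from ⟨by omega, by rw [hmod, h1.2]; simp⟩)]
      by_cases h2 : (i:Int) < nf
      · rw [if_pos (by omega), if_pos h1, if_pos h2]
        simp [String.toList_append]
      · rw [if_neg (by omega), if_pos h1, if_neg h2]
        simp [String.toList_append]
    · rw [if_neg (by rw [hne, hmod]; intro ⟨x,y⟩; exact h1 ⟨x, by omega⟩)]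
      by_cases h2 : (i:Int) < nf
      · rw [if_pos (by omega), if_neg h1, if_pos h2]
        simp [String.toList_append]
      · rw [if_neg (by omega), if_neg h1, if_neg h2]
        simp [String.toList_append]

lemma pvBcat_eq_sepcat (nf : Int) (M : List String) : ∀ (i : Nat),
    (∀ k (h : k < M.length), M[k].toList
        = if ((i + k : Nat) : Int) < nf then pvFilled.toList else pvEmpty.toList) →
    pvBcat nf i M.length = pvSepcat M i := by
  induction M with
  | nil => intro i _; simp [pvBcat, pvSepcat]
  | cons s r ih =>
    intro i hM
    show pvBcat nf i (r.length + 1) = _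
    rw [pvBcat, pvSepcat]
    have h0 := hM 0 (by simp)
    simp only [List.getElem_cons_zero, Nat.add_zero] at h0
    rw [← h0, ih (i+1) (fun k hk => by
      have := hM (k+1) (by simp; omega)
      simpa [Nat.add_assoc, Nat.add_comm 1 k] using this)]

lemma pvSepcat_append (xs ys : List String) : ∀ (i : Nat),
    pvSepcat (xs ++ ys) i = pvSepcat xs i ++ pvSepcat ys (i + xs.length) := by
  induction xs with
  | nil => intro i; simp [pvSepcat]
  | cons s r ih =>
    intro i
    rw [List.cons_append, pvSepcat, pvSepcat, ih (i+1)]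
    simp [Nat.add_assoc, Nat.add_comm 1 r.length]

lemma pvSepcat_inner (c : List String) : ∀ (j i : Nat), i % 5 = 0 → 1 ≤ j → j + c.length ≤ 5 →
    pvSepcat c (i + j) = (c.map String.toList).flatten := by
  induction c with
  | nil => intro j i _ _ _; simp [pvSepcat]
  | cons s r ih =>
    intro j i h5 hj hlen
    rw [pvSepcat]
    rw [if_neg (by simp at hlen ⊢; intro _; omega)]
    rw [show i + j + 1 = i + (j+1) by ring, ih (j+1) i h5 (by omega) (by simp at hlen ⊢; omega)]
    simp

lemma pvChunks5_nil : pvChunks5 [] = [] := by rw [pvChunks5]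

lemma pvChunks5_ne_nil (M : List String) (h : M ≠ []) : pvChunks5 M ≠ [] := by
  rw [pvChunks5_eq M h]; simp

def pvJoin5 : List (List Char) → List Char
  | [] => []
  | [x] => x
  | x :: y :: t => x ++ [' '] ++ pvJoin5 (y :: t)

lemma pvJoin5_eq_intercalate (ps : List (List Char)) : pvJoin5 ps = List.intercalate [' '] ps := by
  induction ps with
  | nil => simp [pvJoin5, List.intercalate]
  | cons x t ih =>
    cases t with
    | nil => simp [pvJoin5, List.intercalate]
    | cons y u =>
      rw [pvJoin5, ih]
      simp [List.intercalate, List.intersperse]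

lemma pvSepcat_chunks (m : Nat) : ∀ (L : List String), L.length ≤ m → ∀ (i : Nat), i % 5 = 0 →
    pvSepcat L i = (if i = 0 ∨ L = [] then [] else [' ']) ++
      pvJoin5 ((pvChunks5 L).map (fun c => (c.map String.toList).flatten)) := by
  induction m with
  | zero =>
    intro L hL i _
    have : L = [] := List.length_eq_zero_iff.mp (by omega)
    subst this
    simp [pvSepcat, pvChunks5, pvJoin5]
  | succ m ih =>
    intro L hL i hi
    cases L with
    | nil => simp [pvSepcat, pvChunks5, pvJoin5]
    | cons s r =>
      rw [pvSepcat, pvChunks5_eq _ (by simp)]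
      have hdrop : (s :: r).drop 5 = r.drop 4 := by simp
      by_cases hr : r.length ≤ 4
      · -- single chunk
        have hdropnil : r.drop 4 = [] := by simp [List.drop_eq_nil_iff]; omega
        rw [hdrop, hdropnil]
        have htake : (s :: r).take 5 = s :: r := List.take_of_length_le (by simp; omega)
        rw [htake, pvChunks5_nil]
        rw [List.map_cons, List.map_nil, pvJoin5]
        rw [pvSepcat_inner r 1 i hi (by omega) (by omega)]
        by_cases h0 : i = 0
        · rw [if_neg (by simp [h0]), if_pos (Or.inl h0)]
          simp
        · rw [if_pos ⟨h0, hi⟩, if_neg (by simp [h0])]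
          simp
      · -- chunk of five, then recurse
        push Not at hr
        have hne4 : r.drop 4 ≠ [] := by simp [List.drop_eq_nil_iff]; omega
        obtain ⟨c, cs, hcs⟩ := List.exists_cons_of_ne_nil (pvChunks5_ne_nil (r.drop 4) hne4)
        rw [hdrop, hcs, List.map_cons, List.map_cons, pvJoin5]
        conv_lhs => rw [show r = r.take 4 ++ r.drop 4 from (List.take_append_drop 4 r).symm]
        rw [pvSepcat_append, pvSepcat_inner (r.take 4) 1 i hi (by omega) (by simp; omega)]
        have hlen4 : (r.take 4).length = 4 := by simp; omega
        rw [hlen4]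
        rw [ih (r.drop 4) (by simp only [List.length_drop, List.length_cons] at hL ⊢; omega) (i + 1 + 4) (by omega)]
        rw [if_neg (show ¬(i + 1 + 4 = 0 ∨ r.drop 4 = []) from by simp [hne4])]
        rw [hcs, List.map_cons]
        have htake : (s :: r).take 5 = s :: r.take 4 := rfl
        rw [htake, List.map_cons]
        by_cases h0 : i = 0
        · rw [if_neg (by simp [h0]), if_pos (Or.inl h0)]
          simp
        · rw [if_pos ⟨h0, hi⟩, if_neg (by simp [h0])]
          simp

-- [].intercalate = flatten (for the inner "".join)
lemma pvIntercalate_nil_left (parts : List (List Char)) :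
    List.intercalate ([] : List Char) parts = parts.flatten := by
  induction parts with
  | nil => simp [List.intercalate]
  | cons x t ih =>
    cases t with
    | nil => simp [List.intercalate]
    | cons y u =>
      rw [show List.intercalate ([]:List Char) (x :: y :: u) = x ++ [] ++ List.intercalate [] (y :: u) from by
        simp [List.intercalate, List.intersperse], ih]
      simp

-- ===== VERDICT (by name: the statement is the Claim_ definition above) =====
theorem get_stars_string_spec : Claim_equal_get_stars_string := by
  intro stars max_stars _
  show get_stars_string stars max_stars = get_stars_string_alt stars max_stars
  apply String.toList_inj.mp
  dsimp only [get_stars_string, get_stars_string_alt]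
  set nf : Nat := stars.toNat with hnf
  set ne : Nat := (max_stars - stars).toNat with hne
  set L : List String := List.replicate nf pvFilled ++ List.replicate ne pvEmpty with hL
  -- A's star_output is L
  have hA0 : (PySem.List.pyRange 0 stars 1).map (fun _ => pvFilled) ++
      (PySem.List.pyRange 0 (max_stars - stars) 1).map (fun _ => pvEmpty) = L := by
    rw [PySem.List.pyRange_one, PySem.List.pyRange_one]
    simp [hL, Function.comp_def, List.map_const']
    rfl
  rw [hA0]
  have hlen : L.length = nf + ne := by simp [hL]
  -- A side: slices become chunks of 5
  have hmap : (PySem.List.pyRange 0 (L.length : Int) 5).map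
      (fun i => PySem.Str.join "" (PySem.List.slice L (some i) (some (i + 5))))
      = (pvChunks5 L).map (fun c => PySem.Str.join "" c) := by
    rw [show (PySem.List.pyRange 0 (L.length : Int) 5).map
        (fun i => PySem.Str.join "" (PySem.List.slice L (some i) (some (i + 5))))
        = ((PySem.List.pyRange ((0:Nat) : Int) (L.length : Int) 5).map
            (fun i => PySem.List.slice L (some i) (some (i + 5)))).map (fun c => PySem.Str.join "" c) from by
      simp [List.map_map, Function.comp]]
    rw [pvMapSlice L L.length 0 (by omega)]
    simp
  rw [hmap]
  -- B side: the fold produces pvBcat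
  have hf := pvFoldB (max stars 0) (nf + ne) 0 ""
  simp only [Nat.cast_zero, Nat.zero_add] at hf
  rw [show max stars 0 + max (max_stars - stars) 0 = ((nf + ne : Nat) : Int) from by push_cast; omega]
  rw [hf]
  -- bridge both to pvSepcat L 0
  rw [← hlen]
  rw [pvBcat_eq_sepcat (max stars 0) L 0 (fun k hk => by
    rw [List.getElem_of_eq hL hk]
    by_cases hk' : k < nf
    · rw [List.getElem_append_left (by simpa using hk'), List.getElem_replicate]
      rw [if_pos (by simp; omega)]
    · rw [List.getElem_append_right (by simpa using hk'), List.getElem_replicate]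
      rw [if_neg (by simp; omega)])]
  rw [pvSepcat_chunks L.length L (le_refl _) 0 (by omega), pvJoin5_eq_intercalate]
  rw [PySem.Str.toList_join]
  simp only [List.map_map]
  rw [show (" " : String).toList = [' '] from rfl]
  rw [show List.map (String.toList ∘ fun c => PySem.Str.join "" c) (pvChunks5 L)
      = List.map (fun c => (List.map String.toList c).flatten) (pvChunks5 L) from by
    apply List.map_congr_left; intro c _
    simp [Function.comp, PySem.Str.toList_join]
    exact pvIntercalate_nil_left _]
  simp [PySem.Chars.join]
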